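-- pv_equiv track=rewrite | github.com/Shir01001/AdvancedSniffer | packet_analysis.py | extract_creds
-- ===== SOURCE A (Python) =====
-- def extract_creds(index_to_start_from, given_text):
--     extracted_creds = ""
--     did_amp_happen = False
--
--     search_from_text = given_text[index_to_start_from:]
--
--     for character in search_from_text:
--         if character == "&" and did_amp_happen:
--             break
--         if character == "&":
--             did_amp_happen = True
--             continue
--         extracted_creds += character
--
--     return extracted_creds
-- ===== SOURCE B (Python) =====
-- def extract_creds(index_to_start_from, given_text):
--     parts = given_text[index_to_start_from:].split("&")
--     return "".join(parts[:2])
-- ===== Notes on version B (the rewrite author's own statement) =====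
-- stated objective: idiomatic
-- what changed: Replaces A's stateful per-character loop (break flag, string += accumulation) by one split('&') of the suffix and a join of the first two fields, done in C-level str methods.
import Mathlib
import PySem

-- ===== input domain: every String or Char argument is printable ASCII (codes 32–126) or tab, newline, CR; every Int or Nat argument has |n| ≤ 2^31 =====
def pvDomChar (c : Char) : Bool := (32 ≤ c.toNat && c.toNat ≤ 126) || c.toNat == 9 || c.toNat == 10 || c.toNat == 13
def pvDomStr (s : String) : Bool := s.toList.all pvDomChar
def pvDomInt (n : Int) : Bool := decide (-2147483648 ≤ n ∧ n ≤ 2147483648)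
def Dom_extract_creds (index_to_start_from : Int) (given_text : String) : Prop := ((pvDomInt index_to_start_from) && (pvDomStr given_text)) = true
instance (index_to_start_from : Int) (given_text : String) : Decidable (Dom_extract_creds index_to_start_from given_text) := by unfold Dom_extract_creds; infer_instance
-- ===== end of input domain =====

-- B replaces A's stateful character loop (break flag) by a single split on '&' joining the first two fields; objective: idiomatic.

-- ===== PORT A =====
-- A's for-loop with its state (extracted_creds, did_amp_happen); the break returns the accumulator.
def extract_creds_loop : List Char → List Char → Bool → List Char
  | [], extracted, _ => extracted
  | c :: rest, extracted, didAmp =>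
    if c = '&' ∧ didAmp then extracted
    else if c = '&' then extract_creds_loop rest extracted true
    else extract_creds_loop rest (extracted ++ [c]) didAmp

def extract_creds (index_to_start_from : Int) (given_text : String) : String :=
  String.ofList
    (extract_creds_loop (PySem.Chars.slice given_text.toList (some index_to_start_from) none) [] false)

-- ===== PORT B =====
def extract_creds_alt (index_to_start_from : Int) (given_text : String) : String :=
  let parts := PySem.Chars.splitOn (PySem.Chars.slice given_text.toList (some index_to_start_from) none) ['&']
  String.ofList (PySem.Chars.join [] (parts.take 2))

-- ===== PRECONDITION & SPEC =====
def Spec_extract_creds (index_to_start_from : Int) (given_text : String) (out : String) : Prop := out = extract_creds_alt index_to_start_from given_text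
instance (index_to_start_from : Int) (given_text : String) (out : String) : Decidable (Spec_extract_creds index_to_start_from given_text out) := by unfold Spec_extract_creds; infer_instance

-- ===== CLAIM (what is proved, stated in full; the proofs are below) =====
def Claim_equal_extract_creds : Prop := ∀ (index_to_start_from : Int) (given_text : String), Dom_extract_creds index_to_start_from given_text → Spec_extract_creds index_to_start_from given_text (extract_creds index_to_start_from given_text)

-- ===== LEMMAS AND PROOFS =====

-- Reference recursive form of splitting on a single '&'.
def splitAmp : List Char → List (List Char)
  | [] => [[]]
  | c :: rest => if c = '&' then [] :: splitAmp rest else (splitAmp rest).modifyHead (c :: ·)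

lemma splitAmp_ne_nil (cs : List Char) : splitAmp cs ≠ [] := by
  induction cs with
  | nil => simp [splitAmp]
  | cons c rest ih =>
    simp only [splitAmp]
    split_ifs with h
    · simp
    · cases hr : splitAmp rest with
      | nil => exact absurd hr ih
      | cons a t => simp

lemma splitOn_go_eq (fuel : ℕ) : ∀ (l cur : List Char) (accs : List (List Char)),
    l.length < fuel →
    PySem.Chars.splitOn.go ['&'] fuel l cur accs =
      accs.reverse ++ (splitAmp l).modifyHead (cur.reverse ++ ·) := by
  induction fuel with
  | zero => intro l cur accs h; omega
  | succ n ih =>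
    intro l cur accs h
    cases l with
    | nil =>
      rw [PySem.Chars.splitOn.go]
      · simp [splitAmp]
      · omega
    | cons c rest =>
      rw [PySem.Chars.splitOn.go]
      simp only [List.isPrefixOf, Bool.and_true, List.length_cons, List.drop_succ_cons,
        List.length_nil, List.drop_zero]
      by_cases hc : c = '&'
      · simp only [hc, beq_self_eq_true, if_true]
        rw [ih rest [] (cur.reverse :: accs) (by simp at h; omega)]
        simp only [splitAmp, if_true, List.reverse_cons, List.reverse_nil, List.nil_append,
          List.append_assoc, List.singleton_append]
        cases splitAmp rest <;> simp
      · have hbc : ('&' == c) = false := beq_eq_false_iff_ne.mpr (Ne.symm hc)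
        simp only [hbc, Bool.false_eq_true, if_false]
        rw [ih rest (c :: cur) accs (by simp at h; omega)]
        simp only [splitAmp, if_neg hc]
        cases hr : splitAmp rest with
        | nil => exact absurd hr (splitAmp_ne_nil rest)
        | cons a t => simp

lemma splitOn_eq_splitAmp (cs : List Char) :
    PySem.Chars.splitOn cs ['&'] = splitAmp cs := by
  unfold PySem.Chars.splitOn
  rw [splitOn_go_eq (cs.length + 1) cs [] [] (by omega)]
  cases hr : splitAmp cs with
  | nil => exact absurd hr (splitAmp_ne_nil cs)
  | cons a t => simp

lemma loop_true (cs : List Char) : ∀ acc : List Char,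
    extract_creds_loop cs acc true = acc ++ (splitAmp cs).headI := by
  induction cs with
  | nil => intro acc; simp [extract_creds_loop, splitAmp]
  | cons c rest ih =>
    intro acc
    by_cases hc : c = '&'
    · simp [extract_creds_loop, splitAmp, hc]
    · simp only [extract_creds_loop, splitAmp, hc, false_and, if_false]
      rw [ih]
      cases hr : splitAmp rest with
      | nil => exact absurd hr (splitAmp_ne_nil rest)
      | cons a t => simp

lemma loop_false (cs : List Char) : ∀ acc : List Char,
    extract_creds_loop cs acc false = acc ++ PySem.Chars.join [] ((splitAmp cs).take 2) := by
  induction cs with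
  | nil => intro acc; simp [extract_creds_loop, splitAmp, PySem.Chars.join, List.intercalate]
  | cons c rest ih =>
    intro acc
    by_cases hc : c = '&'
    · simp only [extract_creds_loop, splitAmp, hc, if_true]
      rw [loop_true]
      cases hr : splitAmp rest with
      | nil => exact absurd hr (splitAmp_ne_nil rest)
      | cons a t =>
        cases t <;> simp [PySem.Chars.join, List.intercalate]
    · simp only [extract_creds_loop, splitAmp, hc, false_and, if_false]
      rw [ih]
      cases hr : splitAmp rest with
      | nil => exact absurd hr (splitAmp_ne_nil rest)
      | cons a t =>
        cases t <;> simp [PySem.Chars.join, List.intercalate]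

-- ===== VERDICT (by name: the statement is the Claim_ definition above) =====
theorem extract_creds_spec : Claim_equal_extract_creds := by
  intro i s _
  unfold Spec_extract_creds extract_creds extract_creds_alt
  rw [loop_false, splitOn_eq_splitAmp]
  simp
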